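-- pv_equiv track=rewrite | github.com/tastrick/adventOfCode | adv2015/4/4.py | is_leading_0
-- ===== SOURCE A (Python) =====
-- def is_leading_0(ha):
--     zer = 0
--     for char in ha:
--         if (char == '0'):
--             zer+=1
--         elif (char != '0'):
--             break
--     if (zer == 6):
--         return True
--     else:
--         return False
-- ===== SOURCE B (Python) =====
-- def is_leading_0(ha):
--     return ha.startswith('000000') and not ha.startswith('0000000')
-- ===== Notes on version B (the rewrite author's own statement) =====
-- stated objective: idiomatic
-- what changed: Replaced the counting loop with an accumulator and break by a closed-form double prefix test: starts with six zeros but not seven.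
import Mathlib
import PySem

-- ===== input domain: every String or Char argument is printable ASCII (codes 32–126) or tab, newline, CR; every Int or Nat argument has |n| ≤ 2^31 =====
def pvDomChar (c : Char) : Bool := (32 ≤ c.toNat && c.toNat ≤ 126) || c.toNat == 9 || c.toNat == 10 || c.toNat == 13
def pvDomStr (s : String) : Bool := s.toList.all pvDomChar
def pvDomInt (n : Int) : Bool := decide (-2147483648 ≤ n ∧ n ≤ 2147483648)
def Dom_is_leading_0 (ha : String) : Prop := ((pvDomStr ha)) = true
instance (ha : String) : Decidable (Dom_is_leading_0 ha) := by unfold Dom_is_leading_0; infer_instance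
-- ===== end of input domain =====

-- B replaces A's counting loop (accumulator + break) by a closed-form double prefix test; objective: idiomatic.

-- ===== PORT A =====
-- the for-loop with break, carried state zer
def isLeading0Loop : List Char → Nat → Nat
  | [], zer => zer
  | c :: cs, zer => if c = '0' then isLeading0Loop cs (zer + 1) else zer

def is_leading_0 (ha : String) : Bool :=
  let zer := isLeading0Loop ha.toList 0
  if zer = 6 then true else false

-- ===== PORT B =====
def is_leading_0_alt (ha : String) : Bool :=
  PySem.Str.startswith ha "000000" && !(PySem.Str.startswith ha "0000000")

-- ===== PRECONDITION & SPEC =====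
def Spec_is_leading_0 (ha : String) (out : Bool) : Prop := out = is_leading_0_alt ha
instance (ha : String) (out : Bool) : Decidable (Spec_is_leading_0 ha out) := by unfold Spec_is_leading_0; infer_instance

-- ===== CLAIM (what is proved, stated in full; the proofs are below) =====
def Claim_equal_is_leading_0 : Prop := ∀ (ha : String), Dom_is_leading_0 ha → Spec_is_leading_0 ha (is_leading_0 ha)

-- ===== LEMMAS AND PROOFS =====
theorem isLeading0Loop_eq (l : List Char) (z : Nat) :
    isLeading0Loop l z = z + (l.takeWhile (· = '0')).length := by
  induction l generalizing z with
  | nil => simp [isLeading0Loop]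
  | cons c cs ih =>
    by_cases h : c = '0' <;> simp [isLeading0Loop, h, List.takeWhile, ih] <;> omega

theorem takeWhile_len_iff (l : List Char) (n : Nat) :
    ((l.takeWhile (· = '0')).length = n) ↔
      (List.replicate n '0' <+: l ∧ ¬ List.replicate (n + 1) '0' <+: l) := by
  induction l generalizing n with
  | nil =>
    cases n <;> simp [List.takeWhile]
  | cons c cs ih =>
    by_cases h : c = '0'
    · subst h
      cases n with
      | zero => simp [List.takeWhile, List.replicate_succ]
      | succ m =>
        simp only [List.takeWhile, decide_true, List.length_cons,
          List.replicate_succ, List.cons_prefix_cons, true_and, Nat.add_left_inj]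
        rw [ih m, List.replicate_succ]
    · have h' : ¬ ('0' = c) := fun h0 => h h0.symm
      cases n with
      | zero =>
        simp [List.takeWhile, h, List.replicate_succ, List.cons_prefix_cons, h']
      | succ m =>
        simp [List.takeWhile, h, List.replicate_succ, List.cons_prefix_cons, h']

theorem is_leading_0_spec : Claim_equal_is_leading_0 := by
  intro ha _
  unfold Spec_is_leading_0 is_leading_0 is_leading_0_alt
  rw [isLeading0Loop_eq]
  have h6 : ("000000" : String).toList = List.replicate 6 '0' := by decide
  have h7 : ("0000000" : String).toList = List.replicate 7 '0' := by decide
  rw [Bool.eq_iff_iff]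
  simp only [PySem.Str.startswith_eq, h6, h7, Bool.and_eq_true, Bool.not_eq_true',
    ← Bool.not_eq_true, PySem.Chars.startswith_iff, Nat.zero_add]
  rw [show ((if (ha.toList.takeWhile (· = '0')).length = 6 then true else false) = true) ↔
      ((ha.toList.takeWhile (· = '0')).length = 6) from by split_ifs with h <;> simp [h]]
  exact takeWhile_len_iff ha.toList 6
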